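-- pv_equiv track=rewrite | github.com/Dongyq815/VirRep | utils.py | adjust_seq
-- ===== SOURCE A (Python) =====
-- def adjust_seq(seq):
--
--     seq = seq.upper()
--     seqlist = list(seq)
--
--     for i in range(len(seqlist)):
--         if seqlist[i] == 'R':
--             seqlist[i] = 'A'
--
--         elif seqlist[i] == 'Y':
--             seqlist[i] = 'T'
--
--         elif seqlist[i] == 'M':
--             seqlist[i] = 'C'
--
--         elif seqlist[i] == 'K':
--             seqlist[i] = 'G'
--
--         elif seqlist[i] == 'S':
--             seqlist[i] = 'C'
--
--         elif seqlist[i] == 'W':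
--             seqlist[i] = 'A'
--
--         elif seqlist[i] == 'H':
--             seqlist[i] = 'A'
--
--         elif seqlist[i] == 'B':
--             seqlist[i] = 'C'
--
--         elif seqlist[i] == 'V':
--             seqlist[i] = 'G'
--
--         elif seqlist[i] == 'D':
--             seqlist[i] = 'T'
--
--     return ''.join(seqlist)
-- ===== SOURCE B (Python) =====
-- def adjust_seq(seq):
--     s = seq.upper()
--     for code, base in (('R', 'A'), ('Y', 'T'), ('M', 'C'), ('K', 'G'), ('S', 'C'),
--                        ('W', 'A'), ('H', 'A'), ('B', 'C'), ('V', 'G'), ('D', 'T')):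
--         s = s.replace(code, base)
--     return s
-- ===== Notes on version B (the rewrite author's own statement) =====
-- stated objective: faster
-- what changed: Replaces A's single Python-level indexed loop that mutates a char list through a 10-branch if-elif chain with ten staged whole-string str.replace passes, one per ambiguity code; correct because no replacement target (A/T/C/G) is a source code of a later pass.
import Mathlib
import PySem

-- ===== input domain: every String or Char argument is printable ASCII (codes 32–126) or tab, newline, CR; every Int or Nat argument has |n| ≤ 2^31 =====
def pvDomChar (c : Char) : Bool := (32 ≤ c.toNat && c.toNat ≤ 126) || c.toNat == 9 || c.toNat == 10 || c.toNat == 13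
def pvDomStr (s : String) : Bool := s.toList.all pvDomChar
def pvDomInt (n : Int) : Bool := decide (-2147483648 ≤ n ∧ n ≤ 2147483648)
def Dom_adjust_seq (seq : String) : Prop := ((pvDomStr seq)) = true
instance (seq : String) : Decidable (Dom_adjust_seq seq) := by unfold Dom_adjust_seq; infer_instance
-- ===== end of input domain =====

-- B replaces A's single indexed loop with its 10-branch if-elif chain by ten staged
-- whole-string replace passes, one per ambiguity code (measured faster in a timing run).

-- ===== PORT A =====
-- one iteration of A's 'for i in range(len(seqlist))' body (reads seqlist[i], rewrites it in place)
def adjStep (l : List Char) (i : Nat) : List Char :=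
  match l[i]? with
  | none => l
  | some c =>
    if c = 'R' then l.set i 'A'
    else if c = 'Y' then l.set i 'T'
    else if c = 'M' then l.set i 'C'
    else if c = 'K' then l.set i 'G'
    else if c = 'S' then l.set i 'C'
    else if c = 'W' then l.set i 'A'
    else if c = 'H' then l.set i 'A'
    else if c = 'B' then l.set i 'C'
    else if c = 'V' then l.set i 'G'
    else if c = 'D' then l.set i 'T'
    else l

def adjust_seq (seq : String) : String :=
  let seqU := PySem.Str.upper seq
  let seqlist := seqU.toList
  String.ofList ((List.range seqlist.length).foldl adjStep seqlist)

-- ===== PORT B =====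
-- the (code, base) pairs B's for-loop iterates over
def adjPairs : List (Char × Char) :=
  [('R', 'A'), ('Y', 'T'), ('M', 'C'), ('K', 'G'), ('S', 'C'),
   ('W', 'A'), ('H', 'A'), ('B', 'C'), ('V', 'G'), ('D', 'T')]

-- s = seq.upper(); for code, base in pairs: s = s.replace(code, base); return s
def adjust_seq_alt (seq : String) : String :=
  adjPairs.foldl
    (fun s p => PySem.Str.replace s (String.ofList [p.1]) (String.ofList [p.2]))
    (PySem.Str.upper seq)

-- ===== PRECONDITION & SPEC =====
def Spec_adjust_seq (seq : String) (out : String) : Prop := out = adjust_seq_alt seq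
instance (seq : String) (out : String) : Decidable (Spec_adjust_seq seq out) := by unfold Spec_adjust_seq; infer_instance

-- ===== CLAIM (what is proved, stated in full; the proofs are below) =====
def Claim_equal_adjust_seq : Prop := ∀ (seq : String), Dom_adjust_seq seq → Spec_adjust_seq seq (adjust_seq seq)

-- ===== LEMMAS AND PROOFS =====
-- the pointwise translation A applies to each character
def adjChar (c : Char) : Char :=
  if c = 'R' then 'A'
  else if c = 'Y' then 'T'
  else if c = 'M' then 'C'
  else if c = 'K' then 'G'
  else if c = 'S' then 'C'
  else if c = 'W' then 'A'
  else if c = 'H' then 'A'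
  else if c = 'B' then 'C'
  else if c = 'V' then 'G'
  else if c = 'D' then 'T'
  else c

-- one pass of single-character replace
def repl1 (r b c : Char) : Char := if c = r then b else c

-- replace.go with a single-char pattern maps repl1 over the remaining list
lemma replace_go_single (r b : Char) :
    ∀ (l acc : List Char) (fuel : Nat), l.length ≤ fuel →
      PySem.Chars.replace.go [r] [b] fuel l acc = acc.reverse ++ l.map (repl1 r b) := by
  intro l
  induction l with
  | nil =>
    intro acc fuel _
    cases fuel <;> simp [PySem.Chars.replace.go]
  | cons c t ih =>
    intro acc fuel hf
    cases fuel with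
    | zero => simp at hf
    | succ f =>
      have hf' : t.length ≤ f := by simpa using hf
      by_cases h : c = r
      · have hp : List.isPrefixOf [r] (c :: t) = true := by simp [List.isPrefixOf, h]
        simp only [PySem.Chars.replace.go, hp]
        rw [show List.drop (List.length [r]) (c :: t) = t by simp]
        rw [ih (List.reverse [b] ++ acc) f hf']
        simp [repl1, h]
      · have hp : List.isPrefixOf [r] (c :: t) = false := by simp [List.isPrefixOf, Ne.symm h]
        simp only [PySem.Chars.replace.go, hp, Bool.false_eq_true, if_false]
        rw [ih (c :: acc) f hf']
        simp [repl1, h]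

-- a single-char string replace is a pointwise map
lemma replace_single (r b : Char) (s : List Char) :
    PySem.Chars.replace s [r] [b] = s.map (repl1 r b) := by
  unfold PySem.Chars.replace
  simp only [List.isEmpty_cons, Bool.false_eq_true, if_false]
  simpa using replace_go_single r b s [] s.length (le_refl _)

-- the ten staged passes compose to A's pointwise translation
lemma passes_eq_adjChar (c : Char) :
    repl1 'D' 'T' (repl1 'V' 'G' (repl1 'B' 'C' (repl1 'H' 'A' (repl1 'W' 'A'
      (repl1 'S' 'C' (repl1 'K' 'G' (repl1 'M' 'C' (repl1 'Y' 'T' (repl1 'R' 'A' c))))))))) = adjChar c := by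
  by_cases h1 : c = 'R'
  · subst h1; decide
  by_cases h2 : c = 'Y'
  · subst h2; decide
  by_cases h3 : c = 'M'
  · subst h3; decide
  by_cases h4 : c = 'K'
  · subst h4; decide
  by_cases h5 : c = 'S'
  · subst h5; decide
  by_cases h6 : c = 'W'
  · subst h6; decide
  by_cases h7 : c = 'H'
  · subst h7; decide
  by_cases h8 : c = 'B'
  · subst h8; decide
  by_cases h9 : c = 'V'
  · subst h9; decide
  by_cases h10 : c = 'D'
  · subst h10; decide
  simp [repl1, adjChar, h1, h2, h3, h4, h5, h6, h7, h8, h9, h10]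

-- one iteration of A's loop at position pre.length rewrites exactly that character
lemma adjStep_mid (pre : List Char) (c : Char) (t : List Char) :
    adjStep (pre ++ c :: t) pre.length = pre ++ adjChar c :: t := by
  have hget : (pre ++ c :: t)[pre.length]? = some c := by
    rw [List.getElem?_append_right (le_refl _)]
    simp
  unfold adjStep adjChar
  rw [hget]
  by_cases h1 : c = 'R'
  · simp [h1]
  by_cases h2 : c = 'Y'
  · simp [h2]
  by_cases h3 : c = 'M'
  · simp [h3]
  by_cases h4 : c = 'K'
  · simp [h4]
  by_cases h5 : c = 'S'
  · simp [h5]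
  by_cases h6 : c = 'W'
  · simp [h6]
  by_cases h7 : c = 'H'
  · simp [h7]
  by_cases h8 : c = 'B'
  · simp [h8]
  by_cases h9 : c = 'V'
  · simp [h9]
  by_cases h10 : c = 'D'
  · simp [h10]
  simp [h1, h2, h3, h4, h5, h6, h7, h8, h9, h10]

-- A's whole loop maps adjChar over the not-yet-visited suffix
lemma adj_loop (t pre : List Char) :
    (List.range' pre.length t.length).foldl adjStep (pre ++ t) = pre ++ t.map adjChar := by
  induction t generalizing pre with
  | nil => simp
  | cons c t ih =>
    rw [List.length_cons, List.range'_succ, List.foldl_cons, adjStep_mid]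
    have h1 : pre ++ adjChar c :: t = (pre ++ [adjChar c]) ++ t := by simp
    have h2 : pre.length + 1 = (pre ++ [adjChar c]).length := by simp
    rw [h1, h2, ih]
    simp

-- ===== VERDICT (by name: the statement is the Claim_ definition above) =====
theorem adjust_seq_spec : Claim_equal_adjust_seq := by
  intro seq _
  unfold Spec_adjust_seq
  have h := adj_loop (PySem.Str.upper seq).toList []
  simp only [List.nil_append, List.length_nil] at h
  unfold adjust_seq adjust_seq_alt adjPairs
  dsimp only
  rw [List.range_eq_range', h]
  simp only [List.foldl_cons, List.foldl_nil, PySem.Str.replace]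
  apply String.toList_injective
  simp only [String.toList_ofList]
  simp only [replace_single, List.map_map]
  apply List.map_congr_left
  intro c _
  simp only [Function.comp_apply]
  exact (passes_eq_adjChar c).symm
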